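-- pv_equiv track=rewrite | github.com/cerredz/Nexus-Engine | engine/Voting/ApprovalVoting.py | approval_voting
-- ===== SOURCE A (Python) =====
-- from typing import List
-- from collections import defaultdict
--
-- def approval_voting(votes: List[List[str]]) -> str or None:
--     if not votes or not any(votes): return None
--
--     vote_counts = defaultdict(int)
--     highest_votes, winner = 0, ""
--
--     if len(votes) == 0: return "No Winner"
--
--     for ballot in votes:
--         for candidate in ballot:
--             vote_counts[candidate] += 1
--
--             if vote_counts[candidate] > highest_votes:
--                 highest_votes = vote_counts[candidate]
--                 winner = candidate
--
--     return winner
-- ===== SOURCE B (Python) =====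
-- from collections import Counter
--
-- def approval_voting(votes):
--     if not votes or not any(votes):
--         return None
--     counts = Counter(c for ballot in votes for c in ballot)
--     target = max(counts.values())
--     running = {}
--     for ballot in votes:
--         for c in ballot:
--             n = running.get(c, 0) + 1
--             if n == target:
--                 return c
--             running[c] = n
-- ===== Notes on version B (the rewrite author's own statement) =====
-- stated objective: alternative
-- what changed: Replaces the single-pass running-argmax (dict + highest/winner updated on every strict improvement) by a two-phase algorithm: tally all ballots into a Counter, take target = max of the counts, then rescan the ballots with a fresh running count and return the first candidate whose count reaches target (early return).
import Mathlib
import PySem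

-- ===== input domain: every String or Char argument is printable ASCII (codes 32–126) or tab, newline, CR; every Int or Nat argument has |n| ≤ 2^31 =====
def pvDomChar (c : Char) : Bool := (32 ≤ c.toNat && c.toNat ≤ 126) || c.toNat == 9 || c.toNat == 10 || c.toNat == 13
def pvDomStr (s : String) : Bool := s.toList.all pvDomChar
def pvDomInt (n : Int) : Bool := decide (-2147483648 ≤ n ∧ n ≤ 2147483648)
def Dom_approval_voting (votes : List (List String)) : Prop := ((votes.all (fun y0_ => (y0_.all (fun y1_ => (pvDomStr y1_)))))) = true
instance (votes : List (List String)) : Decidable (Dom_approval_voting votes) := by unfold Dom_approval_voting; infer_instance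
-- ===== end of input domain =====

-- B replaces A's one-pass running argmax by tally-then-rescan-to-threshold; equal return value proved on all inputs.

-- ===== PORT A =====
-- one step of A's inner loop: defaultdict increment, then update (highest_votes, winner) on strict improvement
def aStep (st : PySem.Dict String Int × Int × String) (candidate : String) :
    PySem.Dict String Int × Int × String :=
  let d := st.1.modify candidate 0 (· + 1)
  let cnt := d.getD candidate 0
  if cnt > st.2.1 then (d, cnt, candidate) else (d, st.2.1, st.2.2)

def approval_voting (votes : List (List String)) : Option String :=
  if votes = [] ∨ votes.all (fun b => b.isEmpty) then none
  else
    -- (the dead `if len(votes) == 0: return "No Winner"` branch of A is unreachable here: votes ≠ [])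
    some ((votes.foldl (fun st ballot => ballot.foldl aStep st)
            (PySem.Dict.empty, (0 : Int), "")).2.2)

-- ===== PORT B =====
-- Counter(c for ballot in votes for c in ballot)
def avTally (votes : List (List String)) : PySem.Dict String Int :=
  votes.foldl (fun d ballot => ballot.foldl (fun d c => d.modify c 0 (· + 1)) d) PySem.Dict.empty

-- inner `for c in ballot` loop of B's second pass: early `return c` when the running count reaches target
def avInner : List String → PySem.Dict String Int → Int → PySem.Dict String Int ⊕ String
  | [], d, _ => .inl d
  | c :: rest, d, target =>
    let n := d.getD c 0 + 1
    if n = target then .inr c else avInner rest (d.insert c n) target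

-- outer `for ballot in votes` loop of B's second pass
def avOuter : List (List String) → PySem.Dict String Int → Int → Option String
  | [], _, _ => none
  | ballot :: rest, d, target =>
    match avInner ballot d target with
    | .inl d' => avOuter rest d' target
    | .inr c => some c

def approval_voting_alt (votes : List (List String)) : Option String :=
  if votes = [] ∨ votes.all (fun b => b.isEmpty) then none
  else
    match PySem.List.max? (avTally votes).values (fun x => x) with
    | none => none  -- unreachable totality guard: the guard above makes the tally nonempty
    | some target => avOuter votes PySem.Dict.empty target

-- ===== PRECONDITION & SPEC =====
def Spec_approval_voting (votes : List (List String)) (out : Option String) : Prop := out = approval_voting_alt votes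
instance (votes : List (List String)) (out : Option String) : Decidable (Spec_approval_voting votes out) := by unfold Spec_approval_voting; infer_instance

-- ===== CLAIM (what is proved, stated in full; the proofs are below) =====
def Claim_equal_approval_voting : Prop := ∀ (votes : List (List String)), Dom_approval_voting votes → Spec_approval_voting votes (approval_voting votes)

-- ===== LEMMAS AND PROOFS =====

-- running maximum count reached while scanning l starting from counts d
def mxRun : List String → PySem.Dict String Int → Int
  | [], _ => 0
  | c :: r, d => max (d.getD c 0 + 1) (mxRun r (d.modify c 0 (· + 1)))

-- B's second pass on a flat candidate list, as an Option
def firstHit (l : List String) (d : PySem.Dict String Int) (t : Int) : Option String :=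
  match avInner l d t with
  | .inl _ => none
  | .inr c => some c

theorem firstHit_cons (c : String) (r : List String) (d : PySem.Dict String Int) (t : Int) :
    firstHit (c :: r) d t =
      if d.getD c 0 + 1 = t then some c else firstHit r (d.insert c (d.getD c 0 + 1)) t := by
  by_cases h : d.getD c 0 + 1 = t
  · simp [firstHit, avInner, h]
  · simp [firstHit, avInner, h]

theorem avInner_append (l1 l2 : List String) (d : PySem.Dict String Int) (t : Int) :
    avInner (l1 ++ l2) d t =
      match avInner l1 d t with
      | .inl d' => avInner l2 d' t
      | .inr c => .inr c := by
  induction l1 generalizing d with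
  | nil => rfl
  | cons c r ih =>
    simp only [List.cons_append, avInner]
    split
    · rfl
    · exact ih _

theorem avOuter_flatten (votes : List (List String)) (d : PySem.Dict String Int) (t : Int) :
    avOuter votes d t = firstHit votes.flatten d t := by
  induction votes generalizing d with
  | nil => rfl
  | cons b rest ih =>
    simp only [avOuter, List.flatten_cons, firstHit, avInner_append]
    cases h : avInner b d t with
    | inl d' => simpa [firstHit] using ih d'
    | inr c => rfl

theorem avTally_flatten (votes : List (List String)) :
    avTally votes = PySem.Dict.counter votes.flatten := by
  rw [PySem.Dict.counter_eq_foldl, List.foldl_flatten]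
  rfl

theorem aLoop_flatten (votes : List (List String)) (st : PySem.Dict String Int × Int × String) :
    votes.foldl (fun st ballot => ballot.foldl aStep st) st = votes.flatten.foldl aStep st := by
  rw [List.foldl_flatten]

theorem modify_nonneg (d : PySem.Dict String Int) (c : String)
    (hd : ∀ x, 0 ≤ d.getD x 0) : ∀ x, 0 ≤ (d.modify c 0 (· + 1)).getD x 0 := by
  intro x
  rw [PySem.Dict.getD_modify]
  split
  · have := hd c; omega
  · exact hd x

theorem mxRun_pos (c : String) (r : List String) (d : PySem.Dict String Int)
    (hd : ∀ x, 0 ≤ d.getD x 0) : 1 ≤ mxRun (c :: r) d := by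
  have := hd c
  simp only [mxRun]
  omega

theorem firstHit_hit (l : List String) (d : PySem.Dict String Int) (t : Int)
    (hd : ∀ x, 0 ≤ d.getD x 0) (ht : t = mxRun l d) (h1 : 1 ≤ t) :
    ∃ c, firstHit l d t = some c := by
  induction l generalizing d with
  | nil => simp [mxRun] at ht; omega
  | cons c r ih =>
    rw [firstHit_cons]
    by_cases hn : d.getD c 0 + 1 = t
    · simp [hn]
    · simp only [hn, if_false]
      have hins : d.insert c (d.getD c 0 + 1) = d.modify c 0 (· + 1) := rfl
      rw [hins]
      apply ih _ (modify_nonneg d c hd)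
      · simp only [mxRun] at ht
        omega

theorem bridge (l : List String) (d : PySem.Dict String Int) (hv : Int) (w : String)
    (hd : ∀ x, 0 ≤ d.getD x 0) (hv0 : 0 ≤ hv) :
    (l.foldl aStep (d, hv, w)).2 =
      (max hv (mxRun l d),
       if hv < mxRun l d then (firstHit l d (max hv (mxRun l d))).getD w else w) := by
  induction l generalizing d hv w with
  | nil =>
    simp only [List.foldl_nil, mxRun]
    rw [if_neg (by omega), max_eq_left hv0]
  | cons c r ih =>
    have hmod : ∀ x, 0 ≤ (d.modify c 0 (· + 1)).getD x 0 := modify_nonneg d c hd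
    have hn : (d.modify c 0 (· + 1)).getD c 0 = d.getD c 0 + 1 := by
      rw [PySem.Dict.getD_modify]; simp
    have hnp : 1 ≤ d.getD c 0 + 1 := by have := hd c; omega
    have hins : d.insert c (d.getD c 0 + 1) = d.modify c 0 (· + 1) := rfl
    simp only [List.foldl_cons, mxRun, aStep, hn]
    by_cases hcmp : hv < d.getD c 0 + 1
    · rw [if_pos hcmp, ih _ _ _ hmod (by omega)]
      set d' := d.modify c 0 (· + 1) with hd'
      set n := d.getD c 0 + 1 with hdefn
      set M := mxRun r d' with hM
      simp only [Prod.mk.injEq]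
      refine ⟨by omega, ?_⟩
      by_cases hMn : n < M
      · rw [if_pos hMn, if_pos (show hv < max n M by omega),
            show max hv (max n M) = M by omega, show max n M = M by omega,
            firstHit_cons, if_neg (by omega), hins]
        obtain ⟨cw, hcw⟩ := firstHit_hit r d' M hmod rfl (by omega)
        rw [hcw]
        rfl
      · rw [if_neg hMn, if_pos (show hv < max n M by omega),
            show max hv (max n M) = n by omega, firstHit_cons, if_pos (by omega)]
        rfl
    · rw [if_neg hcmp, ih _ _ _ hmod hv0]
      set d' := d.modify c 0 (· + 1) with hd'
      set n := d.getD c 0 + 1 with hdefn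
      set M := mxRun r d' with hM
      simp only [Prod.mk.injEq]
      refine ⟨by omega, ?_⟩
      by_cases hMh : hv < M
      · rw [if_pos hMh, if_pos (show hv < max n M by omega),
            show max hv (max n M) = M by omega, show max hv M = M by omega,
            firstHit_cons, if_neg (by omega), hins]
      · rw [if_neg hMh, if_neg (show ¬ hv < max n M by omega)]

-- max over Int list with base 0
def lmax0 (xs : List Int) : Int := xs.foldl max 0

theorem foldl_max_le (xs : List Int) (a m : Int) (ha : a ≤ m) (h : ∀ y ∈ xs, y ≤ m) :
    xs.foldl max a ≤ m := by
  induction xs generalizing a with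
  | nil => exact ha
  | cons x t ih =>
    exact ih _ (by have := h x (by simp); omega) (fun y hy => h y (by simp [hy]))

theorem lmax0_le (xs : List Int) (m : Int) (hm : 0 ≤ m) (h : ∀ y ∈ xs, y ≤ m) : lmax0 xs ≤ m :=
  foldl_max_le xs 0 m hm h

theorem le_lmax0 (xs : List Int) (y : Int) (hy : y ∈ xs) : y ≤ lmax0 xs :=
  (PySem.List.le_foldl_max xs 0).2 y hy

theorem lmax0_nonneg (xs : List Int) : 0 ≤ lmax0 xs :=
  (PySem.List.le_foldl_max xs 0).1

-- the running maximum during the scan equals the maximum of the final tallies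
theorem mxRun_counter (l p : List String) :
    lmax0 ((PySem.Set.ofList l).map (fun c => ((p ++ l).count c : Int))) =
      mxRun l (PySem.Dict.counter p) := by
  induction l generalizing p with
  | nil => rfl
  | cons c r ih =>
    have hg : (fun x => (((p ++ [c]) ++ r).count x : Int)) = (fun x => ((p ++ c :: r).count x : Int)) := by
      funext x
      rw [List.append_assoc, List.singleton_append]
    have hstep : mxRun (c :: r) (PySem.Dict.counter p) =
        max ((p.count c : Int) + 1) (mxRun r (PySem.Dict.counter (p ++ [c]))) := by
      simp only [mxRun, PySem.Dict.getD_counter]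
      rw [PySem.Dict.counter_append_singleton]
    rw [hstep, ← ih (p ++ [c]), hg]
    have hcount : ((p ++ c :: r).count c : Int) = (p.count c : Int) + 1 + (r.count c : Int) := by
      rw [List.count_append, List.count_cons_self]
      push_cast
      ring
    have hL0 := lmax0_nonneg ((PySem.Set.ofList r).map (fun z => ((p ++ c :: r).count z : Int)))
    apply le_antisymm
    · apply lmax0_le
      · omega
      · intro y hy
        obtain ⟨x, hx, rfl⟩ := List.mem_map.1 hy
        rw [PySem.Set.mem_ofList] at hx
        rcases List.mem_cons.1 hx with hxc | hxr
        · subst hxc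
          by_cases hcr : x ∈ r
          · have hle : ((p ++ x :: r).count x : Int) ≤ lmax0 ((PySem.Set.ofList r).map (fun z => ((p ++ x :: r).count z : Int))) :=
              le_lmax0 _ _ (List.mem_map.2 ⟨x, (PySem.Set.mem_ofList r x).2 hcr, rfl⟩)
            omega
          · have hz : r.count x = 0 := List.count_eq_zero.2 hcr
            omega
        · have hle : ((p ++ c :: r).count x : Int) ≤ lmax0 ((PySem.Set.ofList r).map (fun z => ((p ++ c :: r).count z : Int))) :=
            le_lmax0 _ _ (List.mem_map.2 ⟨x, (PySem.Set.mem_ofList r x).2 hxr, rfl⟩)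
          omega
    · have hcmem : ((p ++ c :: r).count c : Int) ≤ lmax0 ((PySem.Set.ofList (c :: r)).map (fun z => ((p ++ c :: r).count z : Int))) :=
        le_lmax0 _ _ (List.mem_map.2 ⟨c, (PySem.Set.mem_ofList _ c).2 (List.mem_cons_self), rfl⟩)
      have hsub : lmax0 ((PySem.Set.ofList r).map (fun z => ((p ++ c :: r).count z : Int))) ≤
          lmax0 ((PySem.Set.ofList (c :: r)).map (fun z => ((p ++ c :: r).count z : Int))) := by
        apply lmax0_le
        · exact lmax0_nonneg _
        · intro y hy
          obtain ⟨x, hx, rfl⟩ := List.mem_map.1 hy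
          rw [PySem.Set.mem_ofList] at hx
          exact le_lmax0 _ _ (List.mem_map.2 ⟨x, (PySem.Set.mem_ofList _ x).2 (List.mem_cons_of_mem c hx), rfl⟩)
      omega

-- Python's max(counts.values()) equals the running maximum, for a nonempty flat list
theorem max_values_counter (l : List String) (hl : l ≠ []) :
    PySem.List.max? ((PySem.Dict.counter l).values) (fun x => x) =
      some (mxRun l PySem.Dict.empty) := by
  have hvals : (PySem.Dict.counter l).values =
      (PySem.Set.ofList l).map (fun c => ((l.count c : Int))) := by
    show ((PySem.Dict.counter l).items).map (·.2) = _
    rw [PySem.Dict.items_counter, List.map_map]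
    rfl
  obtain ⟨c, r, h⟩ : ∃ c r, PySem.Set.ofList l = c :: r := by
    rcases h : PySem.Set.ofList l with _ | ⟨c, r⟩
    · exfalso
      cases l with
      | nil => exact hl rfl
      | cons a t =>
        have : a ∈ PySem.Set.ofList (a :: t) := (PySem.Set.mem_ofList _ a).2 (by simp)
        rw [h] at this; simp at this
    · exact ⟨c, r, rfl⟩
  have hmain := mxRun_counter l []
  simp only [List.nil_append] at hmain
  rw [show PySem.Dict.counter ([] : List String) = PySem.Dict.empty from rfl] at hmain
  have hc1 : 1 ≤ (l.count c : Int) := by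
    have : c ∈ l := (PySem.Set.mem_ofList l c).1 (by rw [h]; simp)
    have := List.count_pos_iff.2 this
    omega
  rw [hvals, h, List.map_cons, PySem.List.max?_id_cons, ← hmain, h, List.map_cons]
  show _ = some (List.foldl max 0 _)
  rw [List.foldl_cons, show max (0:Int) ((l.count c : Int)) = (l.count c : Int) from by omega]

theorem flatten_ne_nil (votes : List (List String))
    (hg : ¬(votes = [] ∨ votes.all (fun b => b.isEmpty))) : votes.flatten ≠ [] := by
  intro hf
  apply hg
  right
  rw [List.all_eq_true]
  intro b hb
  have := List.flatten_eq_nil_iff.1 hf b hb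
  simp [this]

theorem empty_nonneg : ∀ x : String, 0 ≤ (PySem.Dict.empty (κ := String) (ν := Int)).getD x 0 := by
  intro x
  rw [PySem.Dict.getD_empty]

-- ===== VERDICT (by name: the statement is the Claim_ definition above) =====
theorem approval_voting_spec : Claim_equal_approval_voting := by
  intro votes _
  unfold Spec_approval_voting approval_voting approval_voting_alt
  by_cases hg : votes = [] ∨ votes.all (fun b => b.isEmpty)
  · rw [if_pos hg, if_pos hg]
  · rw [if_neg hg, if_neg hg]
    have hfl : votes.flatten ≠ [] := flatten_ne_nil votes hg
    obtain ⟨c0, r0, hcr⟩ : ∃ c0 r0, votes.flatten = c0 :: r0 := by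
      cases hx : votes.flatten with
      | nil => exact absurd hx hfl
      | cons c0 r0 => exact ⟨c0, r0, rfl⟩
    have hmx1 : 1 ≤ mxRun votes.flatten PySem.Dict.empty := by
      rw [hcr]; exact mxRun_pos c0 r0 _ empty_nonneg
    obtain ⟨cw, hcw⟩ := firstHit_hit votes.flatten PySem.Dict.empty
      (mxRun votes.flatten PySem.Dict.empty) empty_nonneg rfl hmx1
    rw [aLoop_flatten, bridge votes.flatten PySem.Dict.empty 0 "" empty_nonneg le_rfl,
        avTally_flatten, max_values_counter votes.flatten hfl]
    show some (if (0:Int) < mxRun votes.flatten PySem.Dict.empty then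
        (firstHit votes.flatten PySem.Dict.empty (max 0 (mxRun votes.flatten PySem.Dict.empty))).getD ""
        else "") = avOuter votes PySem.Dict.empty (mxRun votes.flatten PySem.Dict.empty)
    rw [if_pos (show (0:Int) < mxRun votes.flatten PySem.Dict.empty by omega),
        show max (0:Int) (mxRun votes.flatten PySem.Dict.empty) = mxRun votes.flatten PySem.Dict.empty from by omega,
        avOuter_flatten, hcw]
    rfl
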